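-- pv_equiv track=rewrite | github.com/Ubotica/SegTHRawS_ext | segthraws/dataset_creation/geo_split_seg_dataset.py | find_scenes_combination
-- ===== SOURCE A (Python) =====
-- from itertools import combinations
--
-- def find_scenes_combination(n_elems_per_comb: int = 5,
--                             input_dict: dict = None,
--                             n_events_max: int = None
--                             ):
--
--     for combination in combinations(input_dict.values(), n_elems_per_comb):
--
--         if sum(combination) > n_events_max-1 and sum(combination) < n_events_max+1:
--             used_values = []
--             scenes_combination = []
--             for value in combination:
--                     for key,val in input_dict.items():
--                         if val == value and key not in used_values:
--                             scenes_combination.append(key)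
--                             used_values.append(val)
--                             break
--
--             return scenes_combination
-- ===== SOURCE B (Python) =====
-- def find_scenes_combination(n_elems_per_comb: int = 5,
--                             input_dict: dict = None,
--                             n_events_max: int = None
--                             ):
--     values = list(input_dict.values())
--     n = len(values)
--     # first key holding each value, built once
--     first_key = {}
--     for key, val in input_dict.items():
--         if val not in first_key:
--             first_key[val] = key
--
--     def dfs(i, need, rem):
--         # lexicographically-first (by position) choice of `need` values from values[i:] summing to rem
--         if need == 0:
--             return [] if rem == 0 else None
--         if need < 0 or n - i < need:
--             return None
--         taken = dfs(i + 1, need - 1, rem - values[i])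
--         if taken is not None:
--             return [values[i]] + taken
--         return dfs(i + 1, need, rem)
--
--     chosen = dfs(0, n_elems_per_comb, n_events_max)
--     if chosen is None:
--         return None
--     return [first_key[v] for v in chosen]
-- ===== Notes on version B (the rewrite author's own statement) =====
-- stated objective: alternative
-- what changed: Replaces the itertools.combinations brute-force scan (with an inner dict re-scan per returned element) by a pruned choose/skip backtracking search for the first combination summing to the target, plus a value-to-first-key dict built once for the key reconstruction.
import Mathlib
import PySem

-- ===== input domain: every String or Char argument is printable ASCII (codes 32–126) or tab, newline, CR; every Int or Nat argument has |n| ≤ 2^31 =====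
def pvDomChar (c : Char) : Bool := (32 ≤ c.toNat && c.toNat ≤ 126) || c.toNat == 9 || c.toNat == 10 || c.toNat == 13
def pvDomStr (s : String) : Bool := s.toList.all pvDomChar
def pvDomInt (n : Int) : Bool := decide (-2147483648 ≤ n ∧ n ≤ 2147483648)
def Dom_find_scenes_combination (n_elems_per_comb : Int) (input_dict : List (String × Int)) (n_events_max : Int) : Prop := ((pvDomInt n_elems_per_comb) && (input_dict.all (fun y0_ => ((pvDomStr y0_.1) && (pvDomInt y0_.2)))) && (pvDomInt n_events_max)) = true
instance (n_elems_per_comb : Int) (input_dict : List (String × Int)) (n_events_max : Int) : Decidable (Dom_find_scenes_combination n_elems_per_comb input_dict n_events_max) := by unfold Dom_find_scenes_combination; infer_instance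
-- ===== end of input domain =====

-- B replaces A's brute-force scan of all C(n,k) value-combinations (plus an inner dict re-scan per
-- element) by a pruned choose/skip backtracking search plus a value→first-key dict built once
-- (objective: alternative decomposition, same exact result).

-- ===== PORT A =====
-- Python '==' between a str key and an int value: always False ('key not in used_values' never blocks)
def pyEqStrInt (_key : String) (_val : Int) : Bool := false

-- itertools.combinations(vals, k) in its exact (lexicographic-by-position) order
def combA : Nat → List Int → List (List Int)
  | 0, _ => [[]]
  | _ + 1, [] => []
  | k + 1, x :: xs => (combA k xs).map (fun c => x :: c) ++ combA (k + 1) xs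

-- A's inner double loop: for value in combination: scan input_dict.items(), break on first hit
def innerScanA (input_dict : List (String × Int)) (st : List Int × List String) (value : Int) :
    List Int × List String :=
  match input_dict.find? (fun kv => kv.2 == value && !(st.1.any (fun u => pyEqStrInt kv.1 u))) with
  | some kv => (st.1 ++ [kv.2], st.2 ++ [kv.1])
  | none => st

def find_scenes_combination (n_elems_per_comb : Int) (input_dict : List (String × Int)) (n_events_max : Int) : Option (List String) :=
  -- .toNat is exact under Pre_ (0 ≤ n_elems_per_comb; combinations raises ValueError on negative r)
  match (combA n_elems_per_comb.toNat (input_dict.map Prod.snd)).find?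
      (fun c => c.sum > n_events_max - 1 && c.sum < n_events_max + 1) with
  | some c => some ((c.foldl (innerScanA input_dict) ([], [])).2)
  | none => none

-- ===== PORT B =====
-- first key holding each value, built once (insert only if the value is not yet a key)
def firstKeyDict (input_dict : List (String × Int)) : PySem.Dict Int String :=
  input_dict.foldl (fun fk kv => if fk.contains kv.2 then fk else fk.insert kv.2 kv.1)
    PySem.Dict.empty

-- Source B's dfs(i, need, rem): values[i:] carried as the remaining list (structural recursion)
def dfsB : List Int → Int → Int → Option (List Int)
  | [], need, rem =>
    if need = 0 then (if rem = 0 then some [] else none)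
    else none  -- the guard need < 0 ∨ n - i < need always fires when no element is left
  | x :: xs, need, rem =>
    if need = 0 then (if rem = 0 then some [] else none)
    else if need < 0 ∨ ((x :: xs).length : Int) < need then none
    else
      match dfsB xs (need - 1) (rem - x) with
      | some t => some (x :: t)
      | none => dfsB xs need rem

def find_scenes_combination_alt (n_elems_per_comb : Int) (input_dict : List (String × Int)) (n_events_max : Int) : Option (List String) :=
  let values := input_dict.map Prod.snd
  let fk := firstKeyDict input_dict
  match dfsB values n_elems_per_comb n_events_max with
  | none => none
  -- first_key[v]: v always comes from values, so it is a key of fk and the default is unreachable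
  | some chosen => some (chosen.map (fun v => (PySem.Dict.get? fk v).getD ""))

-- ===== PRECONDITION & SPEC =====
-- Pre_ excludes only negative n_elems_per_comb, where itertools.combinations raises ValueError.
def Pre_find_scenes_combination (n_elems_per_comb : Int) (input_dict : List (String × Int)) (n_events_max : Int) : Prop :=
  0 ≤ n_elems_per_comb
instance (n_elems_per_comb : Int) (input_dict : List (String × Int)) (n_events_max : Int) : Decidable (Pre_find_scenes_combination n_elems_per_comb input_dict n_events_max) := by unfold Pre_find_scenes_combination; infer_instance

def pvWitness_find_scenes_combination : Int × (List (String × Int)) × Int :=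
  (2, [("a", 1), ("b", 2), ("c", 4)], 5)

def Spec_find_scenes_combination (n_elems_per_comb : Int) (input_dict : List (String × Int)) (n_events_max : Int) (out : Option (List String)) : Prop := out = find_scenes_combination_alt n_elems_per_comb input_dict n_events_max
instance (n_elems_per_comb : Int) (input_dict : List (String × Int)) (n_events_max : Int) (out : Option (List String)) : Decidable (Spec_find_scenes_combination n_elems_per_comb input_dict n_events_max out) := by unfold Spec_find_scenes_combination; infer_instance

-- ===== CLAIM =====
def Claim_equal_find_scenes_combination : Prop := ∀ (n_elems_per_comb : Int) (input_dict : List (String × Int)) (n_events_max : Int), Dom_find_scenes_combination n_elems_per_comb input_dict n_events_max → Pre_find_scenes_combination n_elems_per_comb input_dict n_events_max → Spec_find_scenes_combination n_elems_per_comb input_dict n_events_max (find_scenes_combination n_elems_per_comb input_dict n_events_max)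


-- ===== LEMMAS AND PROOFS =====

-- combinations of too few elements: none
lemma combA_eq_nil {k : Nat} {xs : List Int} (h : xs.length < k) : combA k xs = [] := by
  induction xs generalizing k with
  | nil => cases k with
    | zero => omega
    | succ j => rfl
  | cons x xs ih =>
    cases k with
    | zero => omega
    | succ j =>
      simp only [combA]
      rw [ih (by simpa using h), ih (by simp at h ⊢; omega)]
      rfl

-- the search: dfsB finds exactly the first combination (in combA order) with the target sum
-- (x :: c).sum == rem  is  c.sum == rem - x
lemma pred_shift (x rem : Int) :
    ((fun c : List Int => c.sum == rem) ∘ (fun c => x :: c)) = (fun c : List Int => c.sum == rem - x) := by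
  funext c
  simp only [Function.comp_apply, List.sum_cons]
  rw [Bool.eq_iff_iff]
  simp only [beq_iff_eq]
  omega

lemma dfs_eq (xs : List Int) : ∀ (k : Nat) (rem : Int),
    dfsB xs (k : Int) rem = (combA k xs).find? (fun c => c.sum == rem) := by
  induction xs with
  | nil =>
    intro k rem
    cases k with
    | zero =>
      by_cases hr : rem = 0
      · simp [dfsB, combA, hr]
      · have h0 : ¬ ((0 : Int) = rem) := fun h => hr h.symm
        simp [dfsB, combA, hr, h0]
    | succ j =>
      have h0 : ¬ (((j + 1 : Nat) : Int) = 0) := by omega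
      simp only [dfsB]
      rw [if_neg h0]
      simp [combA]
  | cons x xs ih =>
    intro k rem
    cases k with
    | zero =>
      by_cases hr : rem = 0
      · simp [dfsB, combA, hr]
      · have h0 : ¬ ((0 : Int) = rem) := fun h => hr h.symm
        simp [dfsB, combA, hr, h0]
    | succ j =>
      have h0 : ¬ (((j + 1 : Nat) : Int) = 0) := by omega
      by_cases hlen : xs.length < j
      · have hg : (((j + 1 : Nat) : Int) < 0 ∨ (((x :: xs).length) : Int) < ((j + 1 : Nat) : Int)) := by
          right
          simp only [List.length_cons]
          push_cast
          omega
        simp only [dfsB]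
        rw [if_neg h0, if_pos hg]
        simp only [combA]
        rw [combA_eq_nil hlen, combA_eq_nil (show xs.length < j + 1 by omega)]
        simp
      · have hg : ¬ (((j + 1 : Nat) : Int) < 0 ∨ (((x :: xs).length) : Int) < ((j + 1 : Nat) : Int)) := by
          simp only [List.length_cons]
          push_cast
          omega
        simp only [dfsB]
        rw [if_neg h0, if_neg hg]
        have hc1 : ((j + 1 : Nat) : Int) - 1 = ((j : Nat) : Int) := by omega
        rw [hc1, ih j (rem - x), ih (j + 1) rem]
        simp only [combA, List.find?_append, List.find?_map, pred_shift]
        cases (combA j xs).find? (fun c : List Int => c.sum == rem - x) with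
        | none => simp
        | some t => simp

-- A's check  sum > m-1 ∧ sum < m+1  is  sum == m
lemma predA_eq (m : Int) :
    (fun c : List Int => c.sum > m - 1 && c.sum < m + 1) = (fun c => c.sum == m) := by
  funext c
  rw [Bool.eq_iff_iff]
  simp only [Bool.and_eq_true, decide_eq_true_eq, gt_iff_lt, beq_iff_eq]
  omega

-- A's inner double loop appends, per value, the first key of the dict holding it
lemma any_false_fn (l : List Int) : (l.any fun _ => false) = false := by
  induction l <;> simp_all

lemma scanA_snd (d : List (String × Int)) (c : List Int) : ∀ (u : List Int) (s : List String),
    (c.foldl (innerScanA d) (u, s)).2 =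
      s ++ c.flatMap (fun v => ((d.find? (fun kv => kv.2 == v)).map Prod.fst).toList) := by
  induction c with
  | nil => intro u s; simp
  | cons v c ih =>
    intro u s
    simp only [List.foldl_cons, innerScanA, pyEqStrInt, any_false_fn, Bool.not_false,
      Bool.and_true]
    cases hf : d.find? (fun kv => kv.2 == v) with
    | none => simp [hf, ih]
    | some kv => simp [hf, ih]

-- the value→first-key dict looks up the first matching pair
lemma firstKey_get?_aux (v : Int) (d : List (String × Int)) :
    ∀ fk : PySem.Dict Int String,
      PySem.Dict.get? (d.foldl (fun fk kv => if fk.contains kv.2 then fk else fk.insert kv.2 kv.1) fk) v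
        = (PySem.Dict.get? fk v).or ((d.find? (fun kv => kv.2 == v)).map Prod.fst) := by
  induction d with
  | nil => intro fk; cases hg : PySem.Dict.get? fk v <;> simp [Option.or, hg]
  | cons kv d ih =>
    intro fk
    simp only [List.foldl_cons]
    by_cases hv : kv.2 = v
    · subst hv
      rw [List.find?_cons_of_pos (by simp)]
      by_cases hc : PySem.Dict.contains fk kv.2
      · rw [if_pos hc, ih]
        cases hg : PySem.Dict.get? fk kv.2 with
        | none =>
          exact absurd ((PySem.Dict.get?_eq_none_iff_contains _ _).1 hg) (by simp [hc])
        | some w => simp [Option.or]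
      · have hg : PySem.Dict.get? fk kv.2 = none := by
          rw [PySem.Dict.get?_eq_none_iff_contains]
          simpa using hc
        rw [if_neg hc, ih, PySem.Dict.get?_insert_self, hg]
        simp [Option.or]
    · rw [List.find?_cons_of_neg (by simp [hv])]
      by_cases hc : PySem.Dict.contains fk kv.2
      · rw [if_pos hc, ih]
      · rw [if_neg hc, ih, PySem.Dict.get?_insert_of_ne fk kv.1 (fun h => hv h.symm)]

lemma firstKey_get? (d : List (String × Int)) (v : Int) :
    PySem.Dict.get? (firstKeyDict d) v = (d.find? (fun kv => kv.2 == v)).map Prod.fst := by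
  rw [firstKeyDict, firstKey_get?_aux]
  simp [Option.or]

-- every element of a combination comes from the source list
lemma mem_of_mem_combA {k : Nat} {xs c : List Int} (hc : c ∈ combA k xs) :
    ∀ v ∈ c, v ∈ xs := by
  induction xs generalizing k c with
  | nil =>
    cases k with
    | zero => simp_all [combA]
    | succ j => simp [combA] at hc
  | cons x xs ih =>
    cases k with
    | zero => simp_all [combA]
    | succ j =>
      simp only [combA, List.mem_append, List.mem_map] at hc
      rcases hc with ⟨c', hc', rfl⟩ | hc
      · intro v hv
        rcases List.mem_cons.1 hv with rfl | hv
        · simp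
        · exact List.mem_cons_of_mem _ (ih hc' v hv)
      · intro v hv; exact List.mem_cons_of_mem _ (ih hc v hv)

-- ===== VERDICT =====
-- glue: with every value of c present in the dict, A's flatMap of first keys is B's map of lookups
lemma flatMap_eq_map_lookup (d : List (String × Int)) (c : List Int)
    (h : ∀ v ∈ c, ∃ kv ∈ d, kv.2 = v) :
    c.flatMap (fun v => ((d.find? (fun kv => kv.2 == v)).map Prod.fst).toList)
      = c.map (fun v => (PySem.Dict.get? (firstKeyDict d) v).getD "") := by
  induction c with
  | nil => simp
  | cons v c ih =>
    obtain ⟨kv, hkv, hv⟩ := h v (by simp)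
    have hs : (d.find? (fun kv => kv.2 == v)).isSome := by
      rw [List.find?_isSome]; exact ⟨kv, hkv, by simp [hv]⟩
    obtain ⟨kv', hkv'⟩ := Option.isSome_iff_exists.1 hs
    have ih' := ih (fun w hw => h w (List.mem_cons_of_mem _ hw))
    simp [List.flatMap_cons, firstKey_get?, hkv', ih']

-- ===== VERDICT =====
theorem find_scenes_combination_spec : Claim_equal_find_scenes_combination := by
  intro n d m hdom hpre
  obtain ⟨k, rfl⟩ : ∃ k : Nat, (k : Int) = n := ⟨n.toNat, Int.toNat_of_nonneg hpre⟩
  simp only [Spec_find_scenes_combination, find_scenes_combination, find_scenes_combination_alt,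
    Int.toNat_natCast]
  rw [predA_eq, dfs_eq]
  cases hfind : (combA k (d.map Prod.snd)).find? (fun c : List Int => c.sum == m) with
  | none => simp
  | some c =>
    have hcmem : c ∈ combA k (d.map Prod.snd) := List.mem_of_find?_eq_some hfind
    have hmem : ∀ v ∈ c, ∃ kv ∈ d, kv.2 = v := by
      intro v hv
      have := mem_of_mem_combA hcmem v hv
      simpa [List.mem_map, eq_comm] using this
    exact congrArg some (by rw [scanA_snd, flatMap_eq_map_lookup d c hmem]; simp)
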